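-- pv_equiv track=rewrite | github.com/MaryneZa/tokenizer-attacut-pythainlp | attacut/preprocessing.py | find_words_from_preds
-- ===== SOURCE A (Python) =====
-- from typing import Dict, List
--
-- def find_words_from_preds(tokens, preds) -> List[str]:
--     # Construct words from prediction labels {0, 1}
--     curr_word = tokens[0]
--     words = []
--     for s, p in zip(tokens[1:], preds[1:]):
--         if p == 0:
--             curr_word = curr_word + s
--         else:
--             words.append(curr_word)
--             curr_word = s
--
--     words.append(curr_word)
--
--     return words
-- ===== SOURCE B (Python) =====
-- from typing import List
--
-- def find_words_from_preds(tokens, preds) -> List[str]: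
--     # Two passes: first index the word-start positions, then assemble each
--     # word by joining the token slice between consecutive starts.
--     limit = max(1, min(len(tokens), len(preds)))
--     starts = [0] + [i for i in range(1, limit) if preds[i] != 0]
--     ends = starts[1:] + [limit]
--     return ["".join(tokens[a:b]) for a, b in zip(starts, ends)]
-- ===== Notes on version B (the rewrite author's own statement) =====
-- stated objective: alternative
-- what changed: Replaced A's accumulate-and-flush loop (growing a current word and flushing it at each boundary) by a two-pass decomposition: first collect the word-start indices where the prediction label is nonzero, then assemble each word by joining the token slice between consecutive start indices.
import Mathlib
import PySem

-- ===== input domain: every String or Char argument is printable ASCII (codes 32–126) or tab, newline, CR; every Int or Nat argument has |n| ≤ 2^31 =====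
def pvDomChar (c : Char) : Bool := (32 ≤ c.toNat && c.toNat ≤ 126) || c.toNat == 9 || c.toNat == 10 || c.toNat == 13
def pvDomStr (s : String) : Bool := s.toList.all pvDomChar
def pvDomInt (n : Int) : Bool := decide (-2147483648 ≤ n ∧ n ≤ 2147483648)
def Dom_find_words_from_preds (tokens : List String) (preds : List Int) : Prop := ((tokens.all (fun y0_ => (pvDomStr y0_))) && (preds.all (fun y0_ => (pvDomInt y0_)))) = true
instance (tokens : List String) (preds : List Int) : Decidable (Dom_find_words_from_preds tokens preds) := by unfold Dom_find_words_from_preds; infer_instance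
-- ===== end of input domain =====

-- B rebuilds the words in two passes (collect split indices, then join token slices)
-- instead of A's accumulate-and-flush loop; objective: alternative decomposition.

-- ===== PORT A =====
-- loop body of A: state (curr_word, words), element (s, p)
def pvStepA (st : String × List String) (sp : String × Int) : String × List String :=
  if sp.2 = 0 then (st.1 ++ sp.1, st.2) else (sp.1, st.2 ++ [st.1])

def find_words_from_preds (tokens : List String) (preds : List Int) : List String :=
  match PySem.List.pyGet? tokens 0 with
  | none => []   -- tokens[0] raises IndexError on empty tokens; excluded by Pre_
  | some t0 =>
    let pairs := (PySem.List.slice tokens (some 1) none).zip (PySem.List.slice preds (some 1) none)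
    let st := pairs.foldl pvStepA (t0, [])
    st.2 ++ [st.1]

-- ===== PORT B =====
def find_words_from_preds_alt (tokens : List String) (preds : List Int) : List String :=
  let limit : Int := max 1 (min (tokens.length : Int) (preds.length : Int))
  -- every i from range(1, limit) is a valid index into preds, so the pyGetD default is never used
  let starts : List Int :=
    0 :: (PySem.List.pyRange 1 limit 1).filter (fun i => PySem.List.pyGetD preds i 0 != 0)
  let ends : List Int := starts.tail ++ [limit]
  (starts.zip ends).map (fun ab => PySem.Str.join "" (PySem.List.slice tokens (some ab.1) (some ab.2)))

-- ===== PRECONDITION & SPEC =====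
-- Pre_ excludes only empty tokens, where A raises IndexError on tokens[0].
def Pre_find_words_from_preds (tokens : List String) (preds : List Int) : Prop := tokens ≠ []
instance (tokens : List String) (preds : List Int) : Decidable (Pre_find_words_from_preds tokens preds) := by unfold Pre_find_words_from_preds; infer_instance

def pvWitness_find_words_from_preds : List String × List Int := (["ab", "c", "d"], [1, 0, 1])

def Spec_find_words_from_preds (tokens : List String) (preds : List Int) (out : List String) : Prop := out = find_words_from_preds_alt tokens preds
instance (tokens : List String) (preds : List Int) (out : List String) : Decidable (Spec_find_words_from_preds tokens preds out) := by unfold Spec_find_words_from_preds; infer_instance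

-- ===== CLAIM (what is proved, stated in full; the proofs are below) =====
def Claim_equal_find_words_from_preds : Prop := ∀ (tokens : List String) (preds : List Int), Dom_find_words_from_preds tokens preds → Pre_find_words_from_preds tokens preds → Spec_find_words_from_preds tokens preds (find_words_from_preds tokens preds)

-- ===== LEMMAS AND PROOFS =====

-- the words A produces, as structural recursion on the (token, pred) pairs
def pvWordsRec (c : String) : List (String × Int) → List String
  | [] => [c]
  | (s, p) :: r => if p = 0 then pvWordsRec (c ++ s) r else c :: pvWordsRec s r

theorem pvFoldA (pairs : List (String × Int)) : ∀ (c : String) (ws : List String),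
    (pairs.foldl pvStepA (c, ws)).2 ++ [(pairs.foldl pvStepA (c, ws)).1]
      = ws ++ pvWordsRec c pairs := by
  induction pairs with
  | nil => intro c ws; simp [pvWordsRec]
  | cons sp r ih =>
      intro c ws
      obtain ⟨s, p⟩ := sp
      by_cases hp : p = 0
      · simp [pvStepA, hp, pvWordsRec, ih]
      · simp [pvStepA, hp, pvWordsRec, ih]

theorem pvJoin0_nil : PySem.Str.join "" ([] : List String) = "" := by
  simp [PySem.Str.join, PySem.Chars.join_nil]

theorem pvJoin0_cons (s : String) (rest : List String) :
    PySem.Str.join "" (s :: rest) = s ++ PySem.Str.join "" rest := by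
  cases rest with
  | nil => simp [PySem.Str.join, PySem.Chars.join_singleton, PySem.Chars.join_nil]
  | cons t r => simp [PySem.Str.join, PySem.Chars.join_cons_cons]

theorem pvJoin0_singleton (s : String) : PySem.Str.join "" [s] = s := by
  simp [pvJoin0_cons, pvJoin0_nil]

theorem pvJoin0_append (xs : List String) (y : String) :
    PySem.Str.join "" (xs ++ [y]) = PySem.Str.join "" xs ++ y := by
  induction xs with
  | nil => simp [pvJoin0_singleton, pvJoin0_nil]
  | cons x r ih => simp [pvJoin0_cons, ih, String.append_assoc]

-- split indices B collects from position k on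
def pvFilt (preds : List Int) (limit k : Int) : List Int :=
  (PySem.List.pyRange k limit 1).filter (fun i => PySem.List.pyGetD preds i 0 != 0)

-- extending a slice by the element just past its end
theorem pvSlice_succ (l : List String) (a j : Int) (ha : 0 ≤ a) (haj : a ≤ j)
    (hj : j.toNat < l.length) :
    PySem.List.slice l (some a) (some (j + 1)) =
      PySem.List.slice l (some a) (some j) ++ [l[j.toNat]] := by
  rw [PySem.List.slice_toNat l ha (by omega : (0:Int) ≤ j + 1),
      PySem.List.slice_toNat l ha (by omega : (0:Int) ≤ j)]
  have h1 : (j + 1).toNat - a.toNat = (j.toNat - a.toNat) + 1 := by omega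
  rw [h1, List.take_add_one]
  congr 1
  have h2 : (l.drop a.toNat)[j.toNat - a.toNat]? = some l[j.toNat] := by
    rw [List.getElem?_drop, show a.toNat + (j.toNat - a.toNat) = j.toNat by omega,
        List.getElem?_eq_getElem hj]
  simp [h2]

theorem pvSlice_single (l : List String) (k : Int) (hk : 0 ≤ k) (hlt : k.toNat < l.length) :
    PySem.List.slice l (some k) (some (k + 1)) = [l[k.toNat]] := by
  rw [PySem.List.slice_toNat l hk (by omega : (0:Int) ≤ k + 1)]
  have h1 : (k + 1).toNat - k.toNat = 1 := by omega
  rw [h1, List.drop_eq_getElem_cons hlt]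
  rfl

-- the main induction: assembling from split indices equals A's recursion
theorem pvMain (tokens : List String) (preds : List Int) (limit : Int)
    (hlim : limit = min (tokens.length : Int) (preds.length : Int)) :
    ∀ (fuel : Nat) (a j : Int), 0 ≤ a → a ≤ j → j < limit → (limit - j).toNat = fuel →
    (((a :: pvFilt preds limit (j + 1)).zip (pvFilt preds limit (j + 1) ++ [limit])).map
        (fun ab => PySem.Str.join "" (PySem.List.slice tokens (some ab.1) (some ab.2))))
      = pvWordsRec (PySem.Str.join "" (PySem.List.slice tokens (some a) (some (j + 1))))
          ((tokens.drop (j + 1).toNat).zip (preds.drop (j + 1).toNat)) := by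
  intro fuel
  induction fuel with
  | zero => intro a j _ _ hj hf; omega
  | succ n ih =>
      intro a j ha haj hj hf
      by_cases hstep : j + 1 < limit
      · -- the pair (tokens[j+1], preds[j+1]) exists
        have hjt : (j + 1).toNat < tokens.length := by omega
        have hjp : (j + 1).toNat < preds.length := by omega
        have hdrop_t : tokens.drop (j + 1).toNat
            = tokens[(j + 1).toNat] :: tokens.drop ((j + 1).toNat + 1) :=
          List.drop_eq_getElem_cons hjt
        have hdrop_p : preds.drop (j + 1).toNat
            = preds[(j + 1).toNat] :: preds.drop ((j + 1).toNat + 1) :=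
          List.drop_eq_getElem_cons hjp
        have htn : (j + 1).toNat + 1 = (j + 1 + 1).toNat := by omega
        have hget : PySem.List.pyGetD preds (j + 1) 0 = preds[(j + 1).toNat] :=
          PySem.List.pyGetD_eq_getElem (i := j + 1) preds 0 (by omega) (by omega)
        have hfilt : pvFilt preds limit (j + 1)
            = if preds[(j + 1).toNat] ≠ 0
              then (j + 1) :: pvFilt preds limit (j + 1 + 1)
              else pvFilt preds limit (j + 1 + 1) := by
          unfold pvFilt
          rw [PySem.List.pyRange_one_cons hstep]
          by_cases hp : preds[(j + 1).toNat] = 0 <;> simp [hget, hp]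
        by_cases hp : preds[(j + 1).toNat] = 0
        · -- continuation: word keeps growing
          rw [hfilt, if_neg (by simp [hp])]
          have := ih a (j + 1) ha (by omega) hstep (by omega)
          rw [this, hdrop_t, hdrop_p, List.zip_cons_cons, pvWordsRec, if_pos hp]
          rw [pvSlice_succ tokens a (j + 1) ha (by omega) hjt, pvJoin0_append, htn]
        · -- split: emit the current word, start a new one at j+1
          rw [hfilt, if_pos hp]
          have hzip : ((a :: (j + 1) :: pvFilt preds limit (j + 1 + 1)).zip
                (((j + 1) :: pvFilt preds limit (j + 1 + 1)) ++ [limit])).map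
                (fun ab => PySem.Str.join "" (PySem.List.slice tokens (some ab.1) (some ab.2)))
              = PySem.Str.join "" (PySem.List.slice tokens (some a) (some (j + 1)))
                :: (((j + 1) :: pvFilt preds limit (j + 1 + 1)).zip
                    (pvFilt preds limit (j + 1 + 1) ++ [limit])).map
                    (fun ab => PySem.Str.join "" (PySem.List.slice tokens (some ab.1) (some ab.2))) := by
            simp
          rw [hzip]
          have := ih (j + 1) (j + 1) (by omega) le_rfl hstep (by omega)
          rw [this, hdrop_t, hdrop_p, List.zip_cons_cons, pvWordsRec, if_neg hp]
          rw [pvSlice_single tokens (j + 1) (by omega) hjt, pvJoin0_singleton, htn]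
      · -- j + 1 = limit: last word, no pairs left
        have hend : j + 1 = limit := by omega
        have hfilt : pvFilt preds limit (j + 1) = [] := by
          unfold pvFilt
          rw [PySem.List.pyRange_one_eq_nil (by omega)]
          rfl
        have hzip : (tokens.drop (j + 1).toNat).zip (preds.drop (j + 1).toNat)
            = ([] : List (String × Int)) := by
          rcases min_choice (tokens.length : Int) (preds.length : Int) with hm | hm
          · have : tokens.drop (j + 1).toNat = [] := by
              apply List.drop_eq_nil_of_le; omega
            simp [this]
          · have : preds.drop (j + 1).toNat = [] := by
              apply List.drop_eq_nil_of_le; omega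
            simp [this]
        rw [hfilt, hzip]
        simp [pvWordsRec, hend]

-- ===== VERDICT (by name: the statement is the Claim_ definition above) =====
theorem find_words_from_preds_spec : Claim_equal_find_words_from_preds := by
  unfold Claim_equal_find_words_from_preds
  intro tokens preds _ hpre
  unfold Spec_find_words_from_preds
  obtain ⟨t0, ts, rfl⟩ : ∃ t0 ts, tokens = t0 :: ts := by
    cases tokens with
    | nil => exact absurd rfl hpre
    | cons x xs => exact ⟨x, xs, rfl⟩
  -- A's side
  have hA : find_words_from_preds (t0 :: ts) preds
      = pvWordsRec t0 (ts.zip (preds.drop 1)) := by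
    unfold find_words_from_preds
    rw [PySem.List.pyGet?_zero_cons]
    simp only []
    have h1 : PySem.List.slice (t0 :: ts) (some 1) none = ts := by
      rw [PySem.List.slice_from (t0 :: ts) (by omega)]; rfl
    have h2 : PySem.List.slice preds (some 1) none = preds.drop 1 := by
      rw [PySem.List.slice_from preds (by omega)]; rfl
    rw [h1, h2]
    have := pvFoldA (ts.zip (preds.drop 1)) t0 []
    simpa using this
  rw [hA]
  -- B's side
  cases preds with
  | nil =>
      have hmax : max 1 (min (((t0 :: ts).length : Nat) : Int) (0 : Int)) = 1 := by
        omega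
      simp only [find_words_from_preds_alt, List.length_nil, Nat.cast_zero,
        List.tail_cons, hmax]
      rw [PySem.List.pyRange_one_eq_nil le_rfl]
      have hslice : PySem.List.slice (t0 :: ts) (some (0 : Int)) (some (1 : Int)) = [t0] := by
        have := pvSlice_single (t0 :: ts) 0 le_rfl (by simp)
        simpa using this
      simp [hslice, pvJoin0_singleton, pvWordsRec]
  | cons p0 ps =>
      have hmin1 : (1 : Int) ≤ min (((t0 :: ts).length : Nat) : Int) (((p0 :: ps).length : Nat) : Int) := by
        simp only [List.length_cons]
        omega
      have hmax : max 1 (min (((t0 :: ts).length : Nat) : Int) (((p0 :: ps).length : Nat) : Int))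
          = min (((t0 :: ts).length : Nat) : Int) (((p0 :: ps).length : Nat) : Int) :=
        max_eq_right hmin1
      have hmain := pvMain (t0 :: ts) (p0 :: ps)
        (min (((t0 :: ts).length : Nat) : Int) (((p0 :: ps).length : Nat) : Int)) rfl
        (min (((t0 :: ts).length : Nat) : Int) (((p0 :: ps).length : Nat) : Int) - 0).toNat 0 0
        le_rfl le_rfl (by omega) rfl
      simp only [zero_add, Int.toNat_one] at hmain
      have hslice : PySem.List.slice (t0 :: ts) (some (0 : Int)) (some (1 : Int)) = [t0] := by
        have := pvSlice_single (t0 :: ts) 0 le_rfl (by simp)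
        simpa using this
      simp only [pvFilt] at hmain
      rw [hslice, pvJoin0_singleton] at hmain
      simp only [find_words_from_preds_alt, List.tail_cons, hmax]
      rw [hmain]
      simp
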